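-- pv_equiv track=rewrite | github.com/bentekkie/advent_of_code_2021 | day24/parse_alu.py | split_into_digits
-- ===== SOURCE A (Python) =====
-- def split_into_digits(all_inst : list[str]):
--     curr = []
--     for inst in all_inst:
--         if inst == "inp w":
--             yield curr
--             curr = []
--         else:
--             curr.append(inst)
--     yield curr
-- ===== SOURCE B (Python) =====
-- def split_into_digits(all_inst: list[str]):
--     marks = [i for i, inst in enumerate(all_inst) if inst == "inp w"]
--     start = 0
--     for i in marks:
--         yield all_inst[start:i]
--         start = i + 1
--     yield all_inst[start:]
-- ===== Notes on version B (the rewrite author's own statement) =====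
-- stated objective: alternative
-- what changed: B first collects the indices of all 'inp w' markers in one pass and then yields contiguous slices between consecutive markers, instead of A's single pass that grows a current-group accumulator and flushes it at each marker.
import Mathlib
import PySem

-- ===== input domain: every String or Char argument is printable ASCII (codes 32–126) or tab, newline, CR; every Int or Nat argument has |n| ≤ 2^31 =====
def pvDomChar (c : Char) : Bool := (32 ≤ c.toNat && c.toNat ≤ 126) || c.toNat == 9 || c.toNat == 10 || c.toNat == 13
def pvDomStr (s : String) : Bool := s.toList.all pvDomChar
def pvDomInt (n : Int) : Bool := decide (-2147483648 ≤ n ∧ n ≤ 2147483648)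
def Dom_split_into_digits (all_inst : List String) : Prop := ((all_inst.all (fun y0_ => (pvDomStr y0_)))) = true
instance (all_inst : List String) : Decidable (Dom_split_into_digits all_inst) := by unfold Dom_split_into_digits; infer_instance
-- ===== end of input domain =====

-- B collects the indices of all "inp w" markers first and then yields the slices between
-- consecutive markers, instead of A's accumulator that is flushed at each marker (objective: alternative).


-- ===== PORT A =====
-- A: one pass; append to `curr`, flush the group at every "inp w", yield the final `curr`.
def split_into_digits (all_inst : List String) : List (List String) :=
  let st := all_inst.foldl
    (fun (st : List (List String) × List String) inst =>
      if inst = "inp w" then (st.1 ++ [st.2], []) else (st.1, st.2 ++ [inst]))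
    ([], [])
  st.1 ++ [st.2]

-- ===== PORT B =====
-- B helper: marks = [i for i, inst in enumerate(all_inst) if inst == "inp w"]
def pvMarks (all_inst : List String) : List Int :=
  (PySem.List.enumerate all_inst 0).filterMap
    (fun p => if p.2 = "inp w" then some p.1 else none)

-- B helper: the for-loop over marks, yielding all_inst[start:i], then all_inst[start:]
def pvEmit (all_inst : List String) (start : Int) : List Int → List (List String)
  | [] => [PySem.List.slice all_inst (some start) none]
  | i :: ms => PySem.List.slice all_inst (some start) (some i) :: pvEmit all_inst (i + 1) ms

def split_into_digits_alt (all_inst : List String) : List (List String) :=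
  pvEmit all_inst 0 (pvMarks all_inst)

-- ===== PRECONDITION & SPEC =====
def Spec_split_into_digits (all_inst : List String) (out : List (List String)) : Prop := out = split_into_digits_alt all_inst
instance (all_inst : List String) (out : List (List String)) : Decidable (Spec_split_into_digits all_inst out) := by unfold Spec_split_into_digits; infer_instance

-- ===== CLAIM (what is proved, stated in full; the proofs are below) =====
def Claim_equal_split_into_digits : Prop := ∀ (all_inst : List String), Dom_split_into_digits all_inst → Spec_split_into_digits all_inst (split_into_digits all_inst)

-- ===== LEMMAS AND PROOFS =====

-- Reference splitter: splitFrom c l = the groups of l with pending group c.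
def splitFrom (c : List String) : List String → List (List String)
  | [] => [c]
  | h :: t => if h = "inp w" then c :: splitFrom [] t else splitFrom (c ++ [h]) t

-- Marker positions as naturals, structurally.
def marksN : List String → List Nat
  | [] => []
  | h :: t => if h = "inp w" then 0 :: (marksN t).map (· + 1) else (marksN t).map (· + 1)

-- A's fold equals the reference splitter.
theorem lemA (l : List String) (g : List (List String)) (c : List String) :
    (l.foldl
        (fun (st : List (List String) × List String) inst =>
          if inst = "inp w" then (st.1 ++ [st.2], []) else (st.1, st.2 ++ [inst]))
        (g, c)).1
      ++ [(l.foldl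
        (fun (st : List (List String) × List String) inst =>
          if inst = "inp w" then (st.1 ++ [st.2], []) else (st.1, st.2 ++ [inst]))
        (g, c)).2] = g ++ splitFrom c l := by
  induction l generalizing g c with
  | nil => simp [splitFrom]
  | cons h t ih =>
    by_cases hh : h = "inp w" <;> simp [List.foldl_cons, hh, splitFrom, ih]

-- B's comprehension over enumerate equals marksN (shifted by the start index).
theorem lem_marks (l : List String) (s : Nat) :
    (PySem.List.enumerate l (s : Int)).filterMap
        (fun p => if p.2 = "inp w" then some p.1 else none)
      = (marksN l).map (fun i => ((i + s : Nat) : Int)) := by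
  induction l generalizing s with
  | nil => simp [PySem.List.enumerate_nil, marksN]
  | cons h t ih =>
    rw [PySem.List.enumerate_cons, List.filterMap_cons,
      show ((s : Int) + 1) = ((s + 1 : Nat) : Int) from by push_cast; ring, ih (s + 1)]
    by_cases hh : h = "inp w" <;>
      · simp [marksN, hh, List.map_map, Function.comp_def]
        exact fun a _ => by ring

-- Shifting pvEmit past a prefix c.
theorem lem_shift (ms : List Nat) (c l : List String) (s : Nat) :
    pvEmit (c ++ l) ((s + c.length : Nat) : Int)
        (ms.map (fun i => ((i + c.length : Nat) : Int)))
      = pvEmit l ((s : Nat) : Int) (ms.map (fun i => ((i : Nat) : Int))) := by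
  induction ms generalizing s with
  | nil =>
    simp only [List.map_nil, pvEmit, PySem.List.slice_from_natCast]
    rw [show s + c.length = c.length + s from by omega, ← List.drop_drop, List.drop_left]
  | cons i rest ih =>
    simp only [List.map_cons, pvEmit, PySem.List.slice_natCast]
    congr 1
    · rw [show s + c.length = c.length + s from by omega,
        show i + c.length = c.length + i from by omega,
        ← List.drop_drop, List.drop_left]
      congr 1
      omega
    · have := ih (i + 1)
      rw [show ((i + c.length : Nat) : Int) + 1 = ((i + 1 + c.length : Nat) : Int) from by
            push_cast; ring,
          show ((i : Nat) : Int) + 1 = ((i + 1 : Nat) : Int) from by push_cast; ring]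
      exact this

-- pvEmit on the marker positions equals the reference splitter.
theorem lem_main (l c : List String) :
    pvEmit (c ++ l) 0 ((marksN l).map (fun i => ((i + c.length : Nat) : Int)))
      = splitFrom c l := by
  induction l generalizing c with
  | nil => simp [marksN, pvEmit, splitFrom, PySem.List.slice_from_natCast]
  | cons h t ih =>
    by_cases hh : h = "inp w"
    · subst hh
      rw [show marksN ("inp w" :: t) = 0 :: (marksN t).map (· + 1) from by simp [marksN],
        show splitFrom c ("inp w" :: t) = c :: splitFrom [] t from by simp [splitFrom],
        List.map_cons]
      simp only [pvEmit]
      congr 1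
      · rw [show ((0 + c.length : Nat) : Int) = ((c.length : Nat) : Int) from by norm_num]
        simp [PySem.List.slice_to_natCast, List.take_left]
      · rw [List.map_map,
          show ((fun i => ((i + c.length : Nat) : Int)) ∘ (· + 1))
              = (fun i => ((i + (c ++ ["inp w"]).length : Nat) : Int)) from
            funext fun i => by simp only [Function.comp_apply, List.length_append,
                List.length_cons, List.length_nil]; omega,
          show ((0 + c.length : Nat) : Int) + 1 = ((0 + (c ++ ["inp w"]).length : Nat) : Int) from by
            simp only [List.length_append, List.length_cons, List.length_nil]; omega,
          show c ++ "inp w" :: t = (c ++ ["inp w"]) ++ t from by simp,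
          lem_shift (marksN t) (c ++ ["inp w"]) t 0]
        have := ih (c := [])
        simpa using this
    · rw [show marksN (h :: t) = (marksN t).map (· + 1) from by simp [marksN, hh],
        show splitFrom c (h :: t) = splitFrom (c ++ [h]) t from by simp [splitFrom, hh],
        List.map_map,
        show ((fun i => ((i + c.length : Nat) : Int)) ∘ (· + 1))
            = (fun i => ((i + (c ++ [h]).length : Nat) : Int)) from
          funext fun i => by simp only [Function.comp_apply, List.length_append,
                List.length_cons, List.length_nil]; omega,
        show c ++ h :: t = (c ++ [h]) ++ t from by simp]
      exact ih (c := c ++ [h])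

-- ===== VERDICT (by name: the statement is the Claim_ definition above) =====
theorem split_into_digits_spec : Claim_equal_split_into_digits := by
  intro l _
  unfold Spec_split_into_digits split_into_digits split_into_digits_alt pvMarks
  rw [show (0 : Int) = ((0 : Nat) : Int) from rfl, lem_marks l 0]
  have h1 := lemA l [] []
  have h2 := lem_main l []
  simp only [List.nil_append, List.length_nil] at h1 h2
  rw [show ((0 : Nat) : Int) = (0 : Int) from rfl]
  exact h1.trans h2.symm
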